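-- pv_equiv track=rewrite | github.com/exqqstar/Computer-Use-Agent | src/purple_core/validator.py | _build_route_choice_hint
-- ===== SOURCE A (Python) =====
-- from typing import Any
--
-- def _build_route_choice_hint(sibling_routes: list[dict[str, Any]]) -> str:
--     choice_labels: list[str] = []
--     for route in sibling_routes:
--         aliases = [str(alias).lower() for alias in route.get("alias", [])]
--         if "fastest" in aliases:
--             choice_labels.append("the fastest route")
--         elif "shortest" in aliases:
--             choice_labels.append("the shortest route")
--         elif "second" in aliases:
--             choice_labels.append("the second route")
--         elif "third" in aliases:
--             choice_labels.append("the third route")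
--
--     if not choice_labels:
--         return "I found multiple route options. Which route would you like me to use?"
--
--     rendered_choices = ", ".join(dict.fromkeys(choice_labels[:-1]))
--     last_choice = choice_labels[-1]
--     if rendered_choices:
--         return f"I found multiple route options. Which route would you like me to use: {rendered_choices}, or {last_choice}?"
--     return f"I found multiple route options. Which route would you like me to use: {last_choice}?"
-- ===== SOURCE B (Python) =====
-- _RANK = {"fastest": 0, "shortest": 1, "second": 2, "third": 3}
-- _LABELS = ["the fastest route", "the shortest route", "the second route", "the third route"]
--
--
-- def _dedup(xs):
--     # first-occurrence dedup by recursion: keep the head, drop its later copies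
--     if not xs:
--         return []
--     head = xs[0]
--     return [head] + _dedup([x for x in xs[1:] if x != head])
--
--
-- def _build_route_choice_hint(sibling_routes):
--     ranks = []
--     for route in sibling_routes:
--         best = 4
--         for alias in route.get("alias", []):
--             best = min(best, _RANK.get(str(alias).lower(), 4))
--         if best < 4:
--             ranks.append(best)
--
--     if not ranks:
--         return "I found multiple route options. Which route would you like me to use?"
--
--     rendered = ", ".join(_LABELS[r] for r in _dedup(ranks[:-1]))
--     last = _LABELS[ranks[-1]]
--     if rendered:
--         return f"I found multiple route options. Which route would you like me to use: {rendered}, or {last}?"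
--     return f"I found multiple route options. Which route would you like me to use: {last}?"
-- ===== Notes on version B (the rewrite author's own statement) =====
-- stated objective: alternative
-- what changed: B works over small integers instead of strings: each route is reduced to a numeric rank by folding min over a rank table (0=fastest..3=third, 4=no match), the rank prefix is deduplicated by a recursive keep-head/filter-out-duplicates helper instead of dict.fromkeys, and ranks are mapped to label strings only when rendering.
import Mathlib
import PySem

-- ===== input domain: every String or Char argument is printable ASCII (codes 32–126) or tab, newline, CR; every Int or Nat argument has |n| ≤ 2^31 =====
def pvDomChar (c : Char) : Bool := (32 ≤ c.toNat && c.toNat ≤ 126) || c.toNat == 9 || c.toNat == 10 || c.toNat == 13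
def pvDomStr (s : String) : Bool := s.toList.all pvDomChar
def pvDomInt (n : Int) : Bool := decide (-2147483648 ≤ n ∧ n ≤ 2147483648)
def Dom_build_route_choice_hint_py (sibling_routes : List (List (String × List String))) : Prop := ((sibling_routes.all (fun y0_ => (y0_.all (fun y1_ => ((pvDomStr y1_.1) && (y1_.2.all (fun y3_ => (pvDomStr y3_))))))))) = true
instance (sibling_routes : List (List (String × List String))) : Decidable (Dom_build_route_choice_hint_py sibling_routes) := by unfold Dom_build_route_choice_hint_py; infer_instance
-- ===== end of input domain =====

-- B replaces A's per-route if/elif label chain by a numeric min-rank fold over the aliases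
-- (0=fastest … 3=third, 4=no match), dedups the rank prefix by a recursive filter-out-duplicates
-- helper instead of dict.fromkeys, and maps ranks to label strings only at the end (objective: alternative).

-- ===== PORT A =====
def build_route_choice_hint_py (sibling_routes : List (List (String × List String))) : String :=
  let choice_labels := sibling_routes.foldl (fun acc route =>
    let aliases := (PySem.Dict.getD (PySem.Dict.mk route) "alias" []).map PySem.Str.lower
    if aliases.contains "fastest" then acc ++ ["the fastest route"]
    else if aliases.contains "shortest" then acc ++ ["the shortest route"]
    else if aliases.contains "second" then acc ++ ["the second route"]
    else if aliases.contains "third" then acc ++ ["the third route"]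
    else acc) []
  if choice_labels = [] then
    "I found multiple route options. Which route would you like me to use?"
  else
    let rendered := PySem.Str.join ", " (PySem.List.dedup (PySem.List.slice choice_labels none (some (-1))))
    -- choice_labels[-1]: the branch above guarantees choice_labels ≠ [], so the default is unreachable
    let last_choice := PySem.List.pyGetD choice_labels (-1) ""
    if rendered ≠ "" then
      "I found multiple route options. Which route would you like me to use: " ++ rendered ++ ", or " ++ last_choice ++ "?"
    else
      "I found multiple route options. Which route would you like me to use: " ++ last_choice ++ "?"

-- ===== PORT B =====
def pvRankDict : PySem.Dict String Int :=
  PySem.Dict.mk [("fastest", 0), ("shortest", 1), ("second", 2), ("third", 3)]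

def pvLabels : List String :=
  ["the fastest route", "the shortest route", "the second route", "the third route"]

-- _LABELS[r]: only called with r in 0..3, so the default is unreachable
def pvLabel (r : Int) : String := PySem.List.pyGetD pvLabels r ""

-- recursive first-occurrence dedup: keep the head, drop its later copies
def pvDedupRec : List Int → List Int
  | [] => []
  | x :: xs => x :: pvDedupRec (xs.filter (fun y => y ≠ x))
termination_by xs => xs.length
decreasing_by simp only [List.length_unattach]; exact Nat.lt_succ_of_le (le_trans (List.length_filter_le _ _) (le_of_eq List.length_attach))

def build_route_choice_hint_py_alt (sibling_routes : List (List (String × List String))) : String :=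
  let ranks := sibling_routes.foldl (fun acc route =>
    let best := (PySem.Dict.getD (PySem.Dict.mk route) "alias" []).foldl
      (fun b a => min b (PySem.Dict.getD pvRankDict (PySem.Str.lower a) 4)) 4
    if best < 4 then acc ++ [best] else acc) []
  if ranks = [] then
    "I found multiple route options. Which route would you like me to use?"
  else
    let rendered := PySem.Str.join ", " ((pvDedupRec (PySem.List.slice ranks none (some (-1)))).map pvLabel)
    -- ranks[-1]: the branch above guarantees ranks ≠ [], so the default is unreachable
    let last := pvLabel (PySem.List.pyGetD ranks (-1) 0)
    if rendered ≠ "" then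
      "I found multiple route options. Which route would you like me to use: " ++ rendered ++ ", or " ++ last ++ "?"
    else
      "I found multiple route options. Which route would you like me to use: " ++ last ++ "?"

-- ===== PRECONDITION & SPEC =====
def Spec_build_route_choice_hint_py (sibling_routes : List (List (String × List String))) (out : String) : Prop := out = build_route_choice_hint_py_alt sibling_routes
instance (sibling_routes : List (List (String × List String))) (out : String) : Decidable (Spec_build_route_choice_hint_py sibling_routes out) := by unfold Spec_build_route_choice_hint_py; infer_instance

-- ===== CLAIM (what is proved, stated in full; the proofs are below) =====
def Claim_equal_build_route_choice_hint_py : Prop := ∀ (sibling_routes : List (List (String × List String))), Dom_build_route_choice_hint_py sibling_routes → Spec_build_route_choice_hint_py sibling_routes (build_route_choice_hint_py sibling_routes)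

-- ===== LEMMAS AND PROOFS =====

-- the value A's four-way if/elif chain assigns to an alias list (4 = no label)
def pvChainVal (l : List String) : Int :=
  if l.contains "fastest" then 0
  else if l.contains "shortest" then 1
  else if l.contains "second" then 2
  else if l.contains "third" then 3
  else 4

-- B's per-route step, phrased through pvChainVal (proof-side normal form)
def pvStepB (acc : List Int) (route : List (String × List String)) : List Int :=
  if pvChainVal (((PySem.Dict.mk route).getD "alias" []).map PySem.Str.lower) < 4 then
    acc ++ [pvChainVal (((PySem.Dict.mk route).getD "alias" []).map PySem.Str.lower)]
  else acc

theorem pvChainVal_le (l : List String) : pvChainVal l ≤ 4 := by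
  unfold pvChainVal; split_ifs <;> norm_num

theorem pvChainVal_nonneg (l : List String) : 0 ≤ pvChainVal l := by
  unfold pvChainVal; split_ifs <;> norm_num

-- the literal rank dictionary, evaluated
theorem pv_rank_eval (a : String) :
    PySem.Dict.getD pvRankDict a 4 =
      (if a = "fastest" then 0 else if a = "shortest" then 1
       else if a = "second" then 2 else if a = "third" then 3 else 4) := by
  by_cases h1 : a = "fastest"
  · subst h1; decide
  by_cases h2 : a = "shortest"
  · subst h2; decide
  by_cases h3 : a = "second"
  · subst h3; decide
  by_cases h4 : a = "third"
  · subst h4; decide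
  have e1 : ("fastest" == a) = false := beq_eq_false_iff_ne.mpr (fun he => h1 he.symm)
  have e2 : ("shortest" == a) = false := beq_eq_false_iff_ne.mpr (fun he => h2 he.symm)
  have e3 : ("second" == a) = false := beq_eq_false_iff_ne.mpr (fun he => h3 he.symm)
  have e4 : ("third" == a) = false := beq_eq_false_iff_ne.mpr (fun he => h4 he.symm)
  simp [pvRankDict, PySem.Dict.getD, PySem.Dict.get?, List.find?,
    e1, e2, e3, e4, h1, h2, h3, h4]

-- one alias folded into the min-rank accumulator = extending the chain by that alias
theorem pv_rank_chain_cons (a : String) (l : List String) :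
    min (PySem.Dict.getD pvRankDict a 4) (pvChainVal l) = pvChainVal (a :: l) := by
  rw [pv_rank_eval]
  unfold pvChainVal
  simp only [List.contains_cons, Bool.or_eq_true, beq_iff_eq]
  split_ifs <;> simp_all [eq_comm]

-- the min-rank fold over the raw aliases = A's chain value of the lowercased aliases
theorem pv_fold_rank (l : List String) (b : Int) (hb : b ≤ 4) :
    l.foldl (fun b a => min b (PySem.Dict.getD pvRankDict (PySem.Str.lower a) 4)) b =
      min b (pvChainVal (l.map PySem.Str.lower)) := by
  induction l generalizing b with
  | nil => simp [pvChainVal, min_eq_left hb]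
  | cons a l ih =>
      rw [List.foldl_cons, ih _ (le_trans (min_le_left _ _) hb), min_assoc, List.map_cons,
        pv_rank_chain_cons]

-- B's per-route min-rank fold (accumulator 4) in closed form
theorem pv_best_eq (l : List String) :
    l.foldl (fun b a => min b (PySem.Dict.getD pvRankDict (PySem.Str.lower a) 4)) 4 =
      pvChainVal (l.map PySem.Str.lower) := by
  rw [pv_fold_rank _ _ (le_refl 4)]
  exact min_eq_right (pvChainVal_le _)

-- B's route fold, rewritten into the pvStepB normal form
theorem pv_foldB_eq (routes : List (List (String × List String))) (acc : List Int) :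
    routes.foldl (fun acc route =>
      let best := (PySem.Dict.getD (PySem.Dict.mk route) "alias" []).foldl
        (fun b a => min b (PySem.Dict.getD pvRankDict (PySem.Str.lower a) 4)) 4
      if best < 4 then acc ++ [best] else acc) acc = routes.foldl pvStepB acc := by
  have hf : (fun (acc : List Int) (route : List (String × List String)) =>
      let best := (PySem.Dict.getD (PySem.Dict.mk route) "alias" []).foldl
        (fun b a => min b (PySem.Dict.getD pvRankDict (PySem.Str.lower a) 4)) 4
      if best < 4 then acc ++ [best] else acc) = pvStepB := by
    funext acc route
    simp only [pv_best_eq]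
    rfl
  rw [hf]

-- B's rank accumulator only holds ranks 0..3
theorem pv_mem_ranks (routes : List (List (String × List String))) (acc : List Int)
    (h : ∀ x ∈ acc, 0 ≤ x ∧ x < 4) :
    ∀ x ∈ routes.foldl pvStepB acc, 0 ≤ x ∧ x < 4 := by
  induction routes generalizing acc with
  | nil => exact h
  | cons r rs ih =>
      rw [List.foldl_cons]
      refine ih _ ?_
      intro y hy
      unfold pvStepB at hy
      by_cases hb : pvChainVal (((PySem.Dict.mk r).getD "alias" []).map PySem.Str.lower) < 4
      · rw [if_pos hb] at hy
        rcases List.mem_append.mp hy with hy | hy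
        · exact h y hy
        · rw [List.mem_singleton] at hy
          exact hy ▸ ⟨pvChainVal_nonneg _, hb⟩
      · rw [if_neg hb] at hy
        exact h y hy

theorem pvLabel_zero : pvLabel 0 = "the fastest route" := rfl
theorem pvLabel_one : pvLabel 1 = "the shortest route" := rfl
theorem pvLabel_two : pvLabel 2 = "the second route" := rfl
theorem pvLabel_three : pvLabel 3 = "the third route" := rfl

-- A's per-route step on a mapped accumulator = B's step, mapped
theorem pv_step_eq (accB : List Int) (route : List (String × List String)) :
    (if ((PySem.Dict.getD (PySem.Dict.mk route) "alias" []).map PySem.Str.lower).contains "fastest" then (accB.map pvLabel) ++ ["the fastest route"]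
     else if ((PySem.Dict.getD (PySem.Dict.mk route) "alias" []).map PySem.Str.lower).contains "shortest" then (accB.map pvLabel) ++ ["the shortest route"]
     else if ((PySem.Dict.getD (PySem.Dict.mk route) "alias" []).map PySem.Str.lower).contains "second" then (accB.map pvLabel) ++ ["the second route"]
     else if ((PySem.Dict.getD (PySem.Dict.mk route) "alias" []).map PySem.Str.lower).contains "third" then (accB.map pvLabel) ++ ["the third route"]
     else (accB.map pvLabel)) = (pvStepB accB route).map pvLabel := by
  unfold pvStepB pvChainVal
  set al := (PySem.Dict.getD (PySem.Dict.mk route) "alias" []).map PySem.Str.lower with hal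
  by_cases c1 : al.contains "fastest" = true
  · rw [if_pos c1, if_pos c1, if_pos (by norm_num : (0:Int) < 4)]
    simp [pvLabel_zero]
  rw [if_neg c1, if_neg c1]
  by_cases c2 : al.contains "shortest" = true
  · rw [if_pos c2, if_pos c2, if_pos (by norm_num : (1:Int) < 4)]
    simp [pvLabel_one]
  rw [if_neg c2, if_neg c2]
  by_cases c3 : al.contains "second" = true
  · rw [if_pos c3, if_pos c3, if_pos (by norm_num : (2:Int) < 4)]
    simp [pvLabel_two]
  rw [if_neg c3, if_neg c3]
  by_cases c4 : al.contains "third" = true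
  · rw [if_pos c4, if_pos c4, if_pos (by norm_num : (3:Int) < 4)]
    simp [pvLabel_three]
  rw [if_neg c4, if_neg c4, if_neg (by norm_num : ¬ (4:Int) < 4)]

-- A's label accumulator is B's rank accumulator mapped through pvLabel
theorem pv_fold_labels (routes : List (List (String × List String))) (accB : List Int) :
    routes.foldl (fun acc route =>
      let aliases := (PySem.Dict.getD (PySem.Dict.mk route) "alias" []).map PySem.Str.lower
      if aliases.contains "fastest" then acc ++ ["the fastest route"]
      else if aliases.contains "shortest" then acc ++ ["the shortest route"]
      else if aliases.contains "second" then acc ++ ["the second route"]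
      else if aliases.contains "third" then acc ++ ["the third route"]
      else acc) (accB.map pvLabel) = (routes.foldl pvStepB accB).map pvLabel := by
  induction routes generalizing accB with
  | nil => rfl
  | cons r rs ih =>
      simp only [List.foldl_cons]
      rw [pv_step_eq accB r]
      exact ih (pvStepB accB r)

-- filtering commutes with the seen-set fold behind PySem.List.dedup
theorem pv_filter_ofList_fold {α : Type} [BEq α] [LawfulBEq α] (p : α → Bool) (xs s : List α) :
    List.filter p (List.foldl PySem.Set.add s xs) =
    List.foldl PySem.Set.add (List.filter p s) (List.filter p xs) := by
  induction xs generalizing s with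
  | nil => rfl
  | cons a xs ih =>
      have hstep : List.filter p (PySem.Set.add s a) =
          if p a = true then PySem.Set.add (List.filter p s) a else List.filter p s := by
        by_cases hs : s.contains a = true
        · have hpa : a ∈ s := by simpa using hs
          by_cases hp : p a = true
          · rw [PySem.Set.add, PySem.Set.contains, if_pos hs, if_pos hp, PySem.Set.add,
              PySem.Set.contains,
              if_pos (List.contains_iff_mem.mpr (List.mem_filter.mpr ⟨hpa, hp⟩))]
          · rw [PySem.Set.add, PySem.Set.contains, if_pos hs, if_neg hp]
        · have hc : ¬ (List.filter p s).contains a = true := by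
            simp only [List.contains_iff_mem, List.mem_filter] at *; tauto
          by_cases hp : p a = true
          · rw [PySem.Set.add, PySem.Set.contains, if_neg hs, if_pos hp, List.filter_append,
              PySem.Set.add, PySem.Set.contains, if_neg hc]
            simp [hp]
          · rw [PySem.Set.add, PySem.Set.contains, if_neg hs, if_neg hp, List.filter_append]
            simp [hp]
      simp only [List.foldl_cons]
      rw [ih, hstep, List.filter_cons]
      by_cases hp : p a = true
      · rw [if_pos hp, if_pos hp, List.foldl_cons]
      · rw [if_neg hp, if_neg hp]

-- clean equations for the well-founded pvDedupRec
theorem pvDedupRec_nil : pvDedupRec [] = [] := by simp [pvDedupRec]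
theorem pvDedupRec_cons (x : Int) (xs : List Int) :
    pvDedupRec (x :: xs) = x :: pvDedupRec (xs.filter (fun y => decide (y ≠ x))) := by
  simp [pvDedupRec]

-- B's recursive filter-dedup computes exactly dict.fromkeys's ordered dedup
theorem pvDedupRec_eq (xs : List Int) : pvDedupRec xs = PySem.List.dedup xs :=
  match xs with
  | [] => by rw [pvDedupRec_nil]; rfl
  | x :: xs => by
      rw [pvDedupRec_cons, pvDedupRec_eq (xs.filter (fun y => decide (y ≠ x)))]
      rw [show (fun y => decide (y ≠ x)) = (fun y => !(y == x)) from funext fun y => by by_cases h : y = x <;> simp [h]]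
      simp only [PySem.List.dedup_eq_ofList, PySem.Set.ofList_cons, PySem.Set.discard]
      congr 1
      rw [PySem.Set.ofList, PySem.Set.ofList, pv_filter_ofList_fold]
      rfl
termination_by xs.length
decreasing_by simpa using Nat.lt_succ_of_le (List.length_filter_le _ _)

-- pvLabel is injective on ranks 0..3
theorem pvLabel_inj (a b : Int) (ha : 0 ≤ a ∧ a < 4) (hb : 0 ≤ b ∧ b < 4)
    (h : pvLabel a = pvLabel b) : a = b := by
  obtain ⟨ha0, ha1⟩ := ha; obtain ⟨hb0, hb1⟩ := hb
  interval_cases a <;> interval_cases b <;> first | rfl | (exfalso; revert h; decide)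

-- dedup of the mapped labels = mapped dedup of the ranks (ranks all in 0..3)
theorem pv_dedup_map (xs : List Int) (h : ∀ x ∈ xs, 0 ≤ x ∧ x < 4) :
    PySem.List.dedup (xs.map pvLabel) = (pvDedupRec xs).map pvLabel :=
  match xs with
  | [] => by rw [pvDedupRec_nil]; rfl
  | x :: xs => by
      have hfilter : List.filter ((fun y => !(y == pvLabel x)) ∘ pvLabel) xs =
          List.filter (fun y => decide (y ≠ x)) xs := by
        apply List.filter_congr
        intro y hy
        show (!(pvLabel y == pvLabel x)) = decide (y ≠ x)
        by_cases he : y = x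
        · subst he; simp
        · have hne : pvLabel y ≠ pvLabel x := fun hl =>
            he (pvLabel_inj y x (h y (List.mem_cons_of_mem _ hy)) (h x List.mem_cons_self) hl)
          simp [he, hne]
      rw [List.map_cons, pvDedupRec_cons, List.map_cons]
      simp only [PySem.List.dedup_eq_ofList, PySem.Set.ofList_cons, PySem.Set.discard]
      congr 1
      rw [PySem.Set.ofList, pv_filter_ofList_fold,
        show List.filter (fun y => !(y == pvLabel x)) PySem.Set.empty = PySem.Set.empty from rfl,
        List.filter_map, hfilter]
      rw [show (List.foldl PySem.Set.add PySem.Set.empty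
          ((xs.filter (fun y => decide (y ≠ x))).map pvLabel) : List String) =
          PySem.List.dedup ((xs.filter (fun y => decide (y ≠ x))).map pvLabel) from rfl]
      exact pv_dedup_map (xs.filter (fun y => decide (y ≠ x)))
        (fun y hy => h y (List.mem_cons_of_mem _ (List.mem_of_mem_filter hy)))
termination_by xs.length
decreasing_by simpa using Nat.lt_succ_of_le (List.length_filter_le _ _)

-- ===== VERDICT (by name: the statement is the Claim_ definition above) =====
theorem build_route_choice_hint_py_spec : Claim_equal_build_route_choice_hint_py := by
  intro routes _
  unfold Spec_build_route_choice_hint_py build_route_choice_hint_py build_route_choice_hint_py_alt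
  rw [pv_foldB_eq]
  have hlab : routes.foldl (fun acc route =>
      let aliases := (PySem.Dict.getD (PySem.Dict.mk route) "alias" []).map PySem.Str.lower
      if aliases.contains "fastest" then acc ++ ["the fastest route"]
      else if aliases.contains "shortest" then acc ++ ["the shortest route"]
      else if aliases.contains "second" then acc ++ ["the second route"]
      else if aliases.contains "third" then acc ++ ["the third route"]
      else acc) [] = (routes.foldl pvStepB []).map pvLabel := by
    simpa using pv_fold_labels routes []
  rw [hlab]
  have hmem : ∀ x ∈ routes.foldl pvStepB [], 0 ≤ x ∧ x < 4 :=
    pv_mem_ranks routes [] (by simp)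
  set ranks := routes.foldl pvStepB [] with hranks
  by_cases hnil : ranks = []
  · simp [hnil]
  · rw [if_neg (by simpa using hnil), if_neg hnil]
    simp only [PySem.List.slice_to_neg_one]
    rw [show (ranks.map pvLabel).dropLast = ranks.dropLast.map pvLabel from List.map_dropLast.symm,
      pv_dedup_map _ (fun x hx => hmem x (List.mem_of_mem_dropLast hx)),
      PySem.List.pyGetD_neg_one _ _ (by simpa using hnil),
      PySem.List.pyGetD_neg_one _ _ hnil,
      List.getLast_map (by simpa using hnil)]
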